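-- pv_equiv track=rewrite | github.com/anie0521/codingtest_prep_repo | baekjoon_coding/10448.py | is_eureka
-- ===== SOURCE A (Python) =====
-- def is_eureka(k):
--     triangles = []
--     n = 1
--     res = []
--
--     while (n * (n + 1) // 2) <= 1000:
--         t = n * (n + 1) // 2
--         triangles.append(t)
--         n += 1
--
--     for i in triangles:
--         for j in triangles:
--             for a in triangles:
--                 sum_tri = i + j + a
--                 if sum_tri == k and sum_tri <= 1000:
--                     return 1
--     return 0
-- ===== SOURCE B (Python) =====
-- def is_eureka(k):
--     # triangular numbers n*(n+1)//2 <= 1000 are exactly n = 1..44 (T(44)=990, T(45)=1035)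
--     tri = [n * (n + 1) // 2 for n in range(1, 45)]
--     two = {i + j for i in tri for j in tri}
--     if k > 1000:
--         return 0
--     for t in tri:
--         if k - t in two:
--             return 1
--     return 0
-- ===== Notes on version B (the rewrite author's own statement) =====
-- stated objective: faster
-- what changed: Builds the 44 triangular numbers by a closed-form comprehension over range(1,45) instead of A's while loop, precomputes the set of all pairwise triangle sums once, and replaces A's triple nested loop with a single scan testing (k - t) set membership after an early k > 1000 gate.
import Mathlib
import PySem

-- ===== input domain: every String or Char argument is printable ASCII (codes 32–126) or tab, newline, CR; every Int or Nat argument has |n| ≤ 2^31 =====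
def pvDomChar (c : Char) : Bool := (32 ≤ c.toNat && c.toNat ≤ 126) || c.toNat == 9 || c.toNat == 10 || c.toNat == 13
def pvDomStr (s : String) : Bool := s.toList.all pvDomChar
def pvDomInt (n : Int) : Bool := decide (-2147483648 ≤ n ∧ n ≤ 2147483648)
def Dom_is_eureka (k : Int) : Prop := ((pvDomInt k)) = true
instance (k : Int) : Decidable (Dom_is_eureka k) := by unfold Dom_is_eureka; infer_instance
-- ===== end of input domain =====

-- One honest line: B builds the 44 triangular numbers by a comprehension over range(1,45)
-- (instead of A's while loop), precomputes the set of pairwise triangle sums once, and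
-- replaces A's triple nested loop with a single membership scan (objective: faster).

-- ===== PORT A =====
-- A's while loop building the triangle list, as recursion on the running n
def buildTriA (n : Int) : List Int :=
  if h : PySem.Int.floordiv (n * (n + 1)) 2 ≤ 1000 then
    PySem.Int.floordiv (n * (n + 1)) 2 :: buildTriA (n + 1)
  else []
termination_by (1001 - n).toNat
decreasing_by
  have hn : n ≤ 1000 := by
    by_contra hc
    push Not at hc
    have h2 : (1001 : Int) ≤ PySem.Int.floordiv (n * (n + 1)) 2 := by
      rw [PySem.Int.le_floordiv_iff_mul_le (by omega)]
      nlinarith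
    omega
  omega

def is_eureka (k : Int) : Int :=
  let triangles := buildTriA 1
  -- the early-return triple loop: return 1 on the first matching triple, else 0
  if triangles.any (fun i => triangles.any (fun j => triangles.any (fun a =>
       decide (i + j + a = k) && decide (i + j + a ≤ 1000)))) then 1 else 0

-- ===== PORT B =====
def is_eureka_alt (k : Int) : Int :=
  let tri := (PySem.List.pyRange 1 45 1).map (fun n => PySem.Int.floordiv (n * (n + 1)) 2)
  let two : PySem.Set Int := PySem.Set.ofList (tri.flatMap (fun i => tri.map (fun j => i + j)))
  if 1000 < k then 0
  else if tri.any (fun t => PySem.Set.contains two (k - t)) then 1 else 0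

-- ===== PRECONDITION & SPEC =====
def Spec_is_eureka (k : Int) (out : Int) : Prop := out = is_eureka_alt k
instance (k : Int) (out : Int) : Decidable (Spec_is_eureka k out) := by unfold Spec_is_eureka; infer_instance

-- ===== CLAIM (what is proved, stated in full; the proofs are below) =====
def Claim_equal_is_eureka : Prop := ∀ (k : Int), Dom_is_eureka k → Spec_is_eureka k (is_eureka k)

-- ===== LEMMAS AND PROOFS =====

-- A's while loop produces exactly the triangular numbers for n = 1..44, i.e. B's comprehension.
theorem buildTriA_eq_range (n : Int) (h1 : 1 ≤ n) (h45 : n ≤ 45) :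
    buildTriA n
      = (PySem.List.pyRange n 45 1).map (fun m => PySem.Int.floordiv (m * (m + 1)) 2) := by
  rw [buildTriA]
  split_ifs with h
  · have hn : n < 45 := by
      by_contra hc
      have he : n = 45 := by omega
      subst he
      exact absurd h (by decide)
    rw [PySem.List.pyRange_one_cons hn, List.map_cons,
        buildTriA_eq_range (n + 1) (by omega) (by omega)]
  · have hn : n = 45 := by
      by_contra hc
      apply h
      have hb : PySem.Int.floordiv (n * (n + 1)) 2 < 1001 := by
        rw [PySem.Int.floordiv_lt_iff_lt_mul (by omega)]
        nlinarith [mul_nonneg (show (0:Int) ≤ 44 - n by omega) (show (0:Int) ≤ n by omega)]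
      omega
    subst hn
    rw [PySem.List.pyRange_one_eq_nil (by omega)]
    rfl
termination_by (45 - n).toNat
decreasing_by omega

-- Both sides reduce to the same existential over the (shared) triangle list.
theorem eureka_eq (k : Int) : is_eureka k = is_eureka_alt k := by
  unfold is_eureka is_eureka_alt
  rw [buildTriA_eq_range 1 (by omega) (by omega)]
  set tri := (PySem.List.pyRange 1 45 1).map (fun m => PySem.Int.floordiv (m * (m + 1)) 2)
    with htri
  have hpos : ∀ x ∈ tri, 1 ≤ x := by
    intro x hx
    rw [htri, List.mem_map] at hx
    obtain ⟨m, hm, rfl⟩ := hx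
    rw [PySem.List.mem_pyRange_one] at hm
    rw [PySem.Int.le_floordiv_iff_mul_le (by omega)]
    nlinarith [hm.1]
  have hcond : (tri.any (fun i => tri.any (fun j => tri.any (fun a =>
      decide (i + j + a = k) && decide (i + j + a ≤ 1000)))) = true)
      ↔ (¬ 1000 < k ∧ tri.any (fun t =>
          PySem.Set.contains (PySem.Set.ofList (tri.flatMap (fun i => tri.map (fun j => i + j)))) (k - t)) = true) := by
    simp only [List.any_eq_true, Bool.and_eq_true, decide_eq_true_eq,
      PySem.Set.contains_iff, PySem.Set.mem_ofList, List.mem_flatMap, List.mem_map]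
    constructor
    · rintro ⟨i, hi, j, hj, a, ha, heq, hle⟩
      exact ⟨by omega, a, ha, i, hi, j, hj, by omega⟩
    · rintro ⟨hk, t, ht, i, hi, j, hj, heq⟩
      exact ⟨i, hi, j, hj, t, ht, by omega, by omega⟩
  by_cases hA : tri.any (fun i => tri.any (fun j => tri.any (fun a =>
      decide (i + j + a = k) && decide (i + j + a ≤ 1000)))) = true
  · obtain ⟨hk, hB⟩ := hcond.mp hA
    rw [if_pos hA, if_neg hk, if_pos hB]
  · rw [if_neg hA]
    by_cases hk : 1000 < k
    · rw [if_pos hk]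
    · have hB : ¬ (tri.any (fun t =>
          PySem.Set.contains (PySem.Set.ofList (tri.flatMap (fun i => tri.map (fun j => i + j)))) (k - t)) = true) :=
        fun hc => hA (hcond.mpr ⟨hk, hc⟩)
      rw [if_neg hk, if_neg hB]

-- ===== VERDICT (by name: the statement is the Claim_ definition above) =====
theorem is_eureka_spec : Claim_equal_is_eureka := by
  intro k _
  unfold Spec_is_eureka
  exact eureka_eq k
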